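-- pv_equiv track=rewrite | github.com/KyleNehman/CMSC471-AI-Project | preProcess.py | containsBracket
-- ===== SOURCE A (Python) =====
-- def containsBracket(word):
--     total = 0
--     ignore = False
--     map = {"{": 0, "}": 0, "[": 0, "]": 0, "(": 0, ")": 0, "<": 0, ">": 0}
--
--     for c in word:
--         if c in map.keys():
--             map[c] += 1
--             ignore = True
--
--     total += map["{"]
--     total -= map["}"]
--     total += map["("]
--     total -= map[")"]
--     total += map["["]
--     total -= map["]"]
--     total += map["<"]
--     total -= map[">"]
--
--     return (total, ignore)
-- ===== SOURCE B (Python) =====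
-- OPENERS = "{([<"
-- CLOSERS = "})]>"
--
-- def containsBracket(word):
--     opens = sum(1 for c in word if c in OPENERS)
--     closes = sum(1 for c in word if c in CLOSERS)
--     return (opens - closes, (opens + closes) > 0)
-- ===== Notes on version B (the rewrite author's own statement) =====
-- stated objective: simpler
-- what changed: B drops A's mutable count dict and its eight post-loop add/subtract statements entirely: it computes two filtered counts (openers and closers over the four-character class strings) and returns (opens - closes, opens + closes > 0), deriving the presence flag from the counts instead of a loop-carried boolean.
import Mathlib
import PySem

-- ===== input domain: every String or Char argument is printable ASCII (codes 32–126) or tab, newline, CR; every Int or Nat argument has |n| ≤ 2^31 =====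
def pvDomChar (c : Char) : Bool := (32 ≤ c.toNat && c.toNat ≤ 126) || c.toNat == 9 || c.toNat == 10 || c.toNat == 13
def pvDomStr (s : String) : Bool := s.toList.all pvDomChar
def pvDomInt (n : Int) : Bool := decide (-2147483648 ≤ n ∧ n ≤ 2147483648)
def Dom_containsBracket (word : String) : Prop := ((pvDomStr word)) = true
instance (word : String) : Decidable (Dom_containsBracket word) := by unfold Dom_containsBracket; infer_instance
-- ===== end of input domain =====

-- B drops A's count dict and its eight post-loop add/subtract statements: it takes two filtered
-- counts (openers, closers) and returns (opens - closes, opens + closes > 0); objective: simpler.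

-- ===== PORT A =====
-- the zero-initialised count dict, in A's insertion order
def cbMap0 : PySem.Dict Char Int :=
  (((((((PySem.Dict.empty.insert '{' 0).insert '}' 0).insert '[' 0).insert ']' 0).insert
      '(' 0).insert ')' 0).insert '<' 0).insert '>' 0

-- the eight += / -= statements computing `total` from the count dict
def cbTot (d : PySem.Dict Char Int) : Int :=
  0 + d.getD '{' 0 - d.getD '}' 0 + d.getD '(' 0 - d.getD ')' 0
    + d.getD '[' 0 - d.getD ']' 0 + d.getD '<' 0 - d.getD '>' 0

def cbStepA (s : PySem.Dict Char Int × Bool) (c : Char) : PySem.Dict Char Int × Bool :=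
  if s.1.contains c then (s.1.modify c 0 (· + 1), true) else s

def containsBracket (word : String) : Int × Bool :=
  let st := word.toList.foldl cbStepA (cbMap0, false)
  (cbTot st.1, st.2)

-- ===== PORT B =====
def cbOpeners : List Char := ['{', '(', '[', '<']
def cbClosers : List Char := ['}', ')', ']', '>']

def containsBracket_alt (word : String) : Int × Bool :=
  let opens : Int := (word.toList.countP (fun c => PySem.Chars.isIn [c] cbOpeners) : Int)
  let closes : Int := (word.toList.countP (fun c => PySem.Chars.isIn [c] cbClosers) : Int)
  (opens - closes, decide (opens + closes > 0))

-- ===== PRECONDITION & SPEC =====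
def Spec_containsBracket (word : String) (out : Int × Bool) : Prop := out = containsBracket_alt word
instance (word : String) (out : Int × Bool) : Decidable (Spec_containsBracket word out) := by unfold Spec_containsBracket; infer_instance

-- ===== CLAIM (what is proved, stated in full; the proofs are below) =====
def Claim_equal_containsBracket : Prop := ∀ (word : String), Dom_containsBracket word → Spec_containsBracket word (containsBracket word)

-- ===== LEMMAS AND PROOFS =====

-- single-char `c in s` is list membership
lemma cb_isIn_singleton (c : Char) (s : List Char) :
    PySem.Chars.isIn [c] s = s.contains c := by
  by_cases h : c ∈ s
  · rw [(PySem.Chars.isIn_iff_infix [c] s).2 ((List.singleton_infix_iff c s).2 h)]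
    simpa using h
  · rw [(PySem.Chars.isIn_eq_false_iff [c] s).2 (fun hi => h ((List.singleton_infix_iff c s).1 hi))]
    simpa using h

-- loop invariant for A's single pass, stated against B's two counts
lemma cb_inv (l : List Char) (d : PySem.Dict Char Int)
    (hk : d.keys = ['{', '}', '[', ']', '(', ')', '<', '>']) (ig : Bool) :
    (cbTot ((l.foldl cbStepA (d, ig)).1), (l.foldl cbStepA (d, ig)).2)
      = (cbTot d + (l.countP (fun c => cbOpeners.contains c) : Int)
           - (l.countP (fun c => cbClosers.contains c) : Int),
         ig || l.any (fun c => cbOpeners.contains c || cbClosers.contains c)) := by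
  induction l generalizing d ig with
  | nil => simp
  | cons c rest ih =>
    simp only [List.foldl_cons, List.countP_cons, List.any_cons]
    have hc : d.contains c = decide (c ∈ (['{', '}', '[', ']', '(', ')', '<', '>'] : List Char)) := by
      rw [PySem.Dict.contains_eq_decide_mem_keys, hk]
    by_cases hmem : c ∈ (['{', '}', '[', ']', '(', ')', '<', '>'] : List Char)
    · have hstepA : cbStepA (d, ig) c = (d.modify c 0 (· + 1), true) := by
        simp [cbStepA, hc, hmem]
      rw [hstepA]
      have hcon : d.contains c = true := by rw [hc]; simpa using hmem
      have hk' : (d.modify c 0 (· + 1)).keys = ['{', '}', '[', ']', '(', ')', '<', '>'] := by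
        rw [PySem.Dict.keys_modify, PySem.Dict.keys_insert_of_contains, hk]; exact hcon
      rw [ih _ hk' true]
      fin_cases hmem <;>
        · refine Prod.ext ?_ (by simp [cbOpeners, cbClosers])
          simp only [cbTot, PySem.Dict.getD_modify]
          simp only [cbOpeners, cbClosers]
          norm_num
          push_cast
          ring
    · have hstepA : cbStepA (d, ig) c = (d, ig) := by
        simp [cbStepA, hc, hmem]
      simp only [List.mem_cons, List.not_mem_nil, or_false, not_or] at hmem
      obtain ⟨h1, h2, h3, h4, h5, h6, h7, h8⟩ := hmem
      have ho : c ∉ cbOpeners := by simp [cbOpeners]; exact ⟨h1, h5, h3, h7⟩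
      have hcl : c ∉ cbClosers := by simp [cbClosers]; exact ⟨h2, h6, h4, h8⟩
      rw [hstepA, ih _ hk ig]
      simp [ho, hcl]

-- B's flag equals "any bracket occurs"
lemma cb_flag (l : List Char) :
    decide ((l.countP (fun c => cbOpeners.contains c) : Int)
        + (l.countP (fun c => cbClosers.contains c) : Int) > 0)
      = l.any (fun c => cbOpeners.contains c || cbClosers.contains c) := by
  by_cases h : l.any (fun c => cbOpeners.contains c || cbClosers.contains c) = true
  · rw [h]
    simp only [List.any_eq_true, Bool.or_eq_true] at h
    obtain ⟨x, hx, hcase⟩ := h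
    rcases hcase with hcase | hcase
    · have : 0 < l.countP (fun c => cbOpeners.contains c) :=
        List.countP_pos_iff.2 ⟨x, hx, hcase⟩
      simp only [decide_eq_true_eq]
      have h2 : (0:Int) ≤ (l.countP (fun c => cbClosers.contains c) : Int) := by positivity
      omega
    · have : 0 < l.countP (fun c => cbClosers.contains c) :=
        List.countP_pos_iff.2 ⟨x, hx, hcase⟩
      simp only [decide_eq_true_eq]
      have h2 : (0:Int) ≤ (l.countP (fun c => cbOpeners.contains c) : Int) := by positivity
      omega
  · rw [Bool.not_eq_true] at h
    rw [h]
    simp only [List.any_eq_false, Bool.or_eq_true, not_or] at h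
    have h1 : l.countP (fun c => cbOpeners.contains c) = 0 :=
      List.countP_eq_zero.2 (fun x hx => by simpa using (h x hx).1)
    have h2 : l.countP (fun c => cbClosers.contains c) = 0 :=
      List.countP_eq_zero.2 (fun x hx => by simpa using (h x hx).2)
    rw [h1, h2]
    simp

-- ===== VERDICT (by name: the statement is the Claim_ definition above) =====
theorem containsBracket_spec : Claim_equal_containsBracket := by
  intro word _
  unfold Spec_containsBracket containsBracket containsBracket_alt
  have h := cb_inv word.toList cbMap0 (by decide) false
  have h0 : cbTot cbMap0 = 0 := by decide
  rw [h0] at h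
  simp only [cb_isIn_singleton]
  rw [cb_flag]
  have h1 := congrArg Prod.fst h
  have h2 := congrArg Prod.snd h
  simp only at h1 h2
  rw [h1, h2]
  norm_num
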